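-- pv_equiv track=rewrite | github.com/cheehongw/leetcode-submissions | submissions/1333-sort-the-jumbled-numbers/solution.py | mapp
-- ===== SOURCE A (Python) =====
-- def mapp(num, mapping):
--     length = len(str(num))
--     x = [0]*length
--
--
--     for i in range(length -1, -1, -1):
--         d = str(num)[i]
--         md = mapping[int(d)]
--         x[i] = str(md)
--
--     return int(''.join(x))
-- ===== SOURCE B (Python) =====
-- def mapp(num, mapping):
--     # peel digits arithmetically (no str(num), no indexing), then join once
--     parts = []
--     n = num
--     while True:
--         n, d = divmod(n, 10)
--         parts.append(str(mapping[d]))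
--         if n == 0:
--             break
--     parts.reverse()
--     return int(''.join(parts))
-- ===== Notes on version B (the rewrite author's own statement) =====
-- stated objective: alternative
-- what changed: B drops A's whole string-of-num machinery (str(num), len, backward index loop over a preallocated buffer, per-character int()) and instead peels the digits arithmetically with divmod, appending each mapped piece and joining once.
import Mathlib
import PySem

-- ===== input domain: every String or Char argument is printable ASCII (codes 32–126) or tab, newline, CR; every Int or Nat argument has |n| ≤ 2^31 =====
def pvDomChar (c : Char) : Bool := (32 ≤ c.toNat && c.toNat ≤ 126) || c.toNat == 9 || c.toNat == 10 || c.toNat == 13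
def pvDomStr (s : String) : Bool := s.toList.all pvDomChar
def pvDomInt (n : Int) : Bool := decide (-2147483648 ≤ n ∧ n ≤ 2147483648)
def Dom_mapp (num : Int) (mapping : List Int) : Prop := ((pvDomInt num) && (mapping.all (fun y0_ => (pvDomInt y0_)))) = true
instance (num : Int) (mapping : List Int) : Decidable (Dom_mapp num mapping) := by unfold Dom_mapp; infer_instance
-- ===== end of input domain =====

-- B replaces A's str(num)/len/index-loop/preallocated-buffer pipeline by arithmetic digit
-- peeling with divmod, appending the mapped pieces and joining once (objective: alternative).

-- ===== PORT A =====
-- A: length = len(str(num)); x = [0]*length; for i in range(length-1,-1,-1):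
--      d = str(num)[i]; md = mapping[int(d)]; x[i] = str(md);  return int(''.join(x))
-- The Python buffer x holds ints 0 that are all overwritten before the join reads them
-- (the loop visits every index); the dummy "0" below stands for those never-read slots.
def mapp (num : Int) (mapping : List Int) : Int :=
  let length : Int := PySem.Str.len (PySem.Int.toStr num)
  let x0 : List String := List.replicate length.toNat "0"
  let x := (PySem.List.pyRange (length - 1) (-1) (-1)).foldl
    (fun x i =>
      PySem.List.pySetD x i (PySem.Int.toStr (PySem.List.pyGetD mapping
        ((PySem.Int.ofChars? [(PySem.Str.pyGet? (PySem.Int.toStr num) i).getD ' ']).getD 0) 0)))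
    x0
  (PySem.Int.ofStr? (PySem.Str.join "" x)).getD 0

-- ===== PORT B =====
-- B: parts = []; while True: n, d = divmod(n, 10); parts.append(str(mapping[d]));
--      if n == 0: break;  parts.reverse(); return int(''.join(parts))
-- Python's loop runs forever when the quotient goes negative (num < 0, outside Pre_);
-- the port recurses only while the quotient is positive, which is the same exit test
-- (q == 0) on every input with 0 ≤ num.
def mappGo (mapping : List Int) (n : Int) (acc : List String) : List String :=
  let q := PySem.Int.floordiv n 10
  let d := PySem.Int.mod n 10
  let acc' := acc ++ [PySem.Int.toStr (PySem.List.pyGetD mapping d 0)]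
  if 0 < q then mappGo mapping q acc' else acc'
termination_by n.toNat
decreasing_by
  have h10 : PySem.Int.floordiv n 10 = n / 10 :=
    PySem.Int.floordiv_eq_ediv_of_pos (by norm_num)
  omega

def mapp_alt (num : Int) (mapping : List Int) : Int :=
  let parts := mappGo mapping num []
  let parts := parts.reverse
  (PySem.Int.ofStr? (PySem.Str.join "" parts)).getD 0

-- ===== PRECONDITION & SPEC =====
-- the decimal digits of a natural number, least significant first (num = 0 has the one digit 0)
def lsdigits (m : Nat) : List Nat := if m = 0 then [0] else Nat.digits 10 m

-- Pre_ is exactly where the Python A returns: num ≥ 0 (otherwise int('-') raises ValueError),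
-- every digit of num indexes into mapping (otherwise IndexError), and every mapped value of a
-- NON-LEADING digit is ≥ 0 (otherwise ''.join contains an interior '-' and int() raises
-- ValueError).  B raises/loops in exactly the same situations, so nothing A returns on is cut.
def Pre_mapp (num : Int) (mapping : List Int) : Prop :=
  0 ≤ num ∧
  (∀ d ∈ lsdigits num.toNat, (d : Int) < mapping.length) ∧
  (∀ d ∈ (lsdigits num.toNat).dropLast, 0 ≤ mapping.getD d 0)
instance (num : Int) (mapping : List Int) : Decidable (Pre_mapp num mapping) := by
  unfold Pre_mapp; infer_instance

def pvWitness_mapp : Int × List Int := (34, [5, 7, 1, 6, 9, 0, 3, 2, 8, 4])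

def Spec_mapp (num : Int) (mapping : List Int) (out : Int) : Prop := out = mapp_alt num mapping
instance (num : Int) (mapping : List Int) (out : Int) : Decidable (Spec_mapp num mapping out) := by
  unfold Spec_mapp; infer_instance

-- ===== CLAIM (what is proved, stated in full; the proofs are below) =====
def Claim_equal_mapp : Prop := ∀ (num : Int) (mapping : List Int), Dom_mapp num mapping → Pre_mapp num mapping → Spec_mapp num mapping (mapp num mapping)

-- ===== LEMMAS AND PROOFS =====

-- the mapped piece contributed by one digit d of num: str(mapping[d])
def pvPiece (mapping : List Int) (d : Nat) : String :=
  PySem.Int.toStr (PySem.List.pyGetD mapping (d : Int) 0)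

lemma pv_toDigitsCore_eq (f : Nat) : ∀ (n : Nat) (acc : List Char), 0 < n → n < f →
    Nat.toDigitsCore 10 f n acc = ((Nat.digits 10 n).map Nat.digitChar).reverse ++ acc := by
  induction f with
  | zero => intro n acc h hf; omega
  | succ f ih =>
    intro n acc h _
    simp only [Nat.toDigitsCore]
    by_cases h10 : n / 10 = 0
    · have hlt : n < 10 := by omega
      rw [if_pos h10, Nat.digits_def' (by norm_num) h, h10, Nat.digits_zero]
      have : n % 10 = n := Nat.mod_eq_of_lt hlt
      simp [this]
    · rw [if_neg h10, ih (n / 10) _ (by omega) (by omega),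
        Nat.digits_def' (by norm_num : 1 < 10) h]
      simp

lemma pv_toChars_eq (num : Int) (h : 0 ≤ num) :
    PySem.Int.toChars num = ((lsdigits num.toNat).map Nat.digitChar).reverse := by
  rw [PySem.Int.toChars, if_neg (by omega), Nat.toDigits, lsdigits]
  by_cases h0 : num.toNat = 0
  · rw [h0, if_pos rfl, Nat.toDigitsCore]
    simp
  · rw [if_neg h0, pv_toDigitsCore_eq _ _ _ (by omega) (by omega)]
    simp

lemma pv_digit_lt {m d : Nat} (hd : d ∈ lsdigits m) : d < 10 := by
  unfold lsdigits at hd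
  by_cases h0 : m = 0
  · rw [if_pos h0] at hd; simp at hd; omega
  · rw [if_neg h0] at hd; exact Nat.digits_lt_base (by norm_num) hd

lemma pv_ofChars_digitChar {d : Nat} (h : d < 10) :
    PySem.Int.ofChars? [Nat.digitChar d] = some (d : Int) := by
  interval_cases d <;> decide

-- the per-index piece A computes from the character str(num)[j] is the piece of digit j
lemma pv_charPiece (num : Int) (mapping : List Int) (j : Nat) (hnum : 0 ≤ num)
    (hj : j < ((lsdigits num.toNat).reverse).length) :
    PySem.Int.toStr (PySem.List.pyGetD mapping
      ((PySem.Int.ofChars? [(PySem.Str.pyGet? (PySem.Int.toStr num) (j : Int)).getD ' ']).getD 0) 0)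
    = pvPiece mapping (((lsdigits num.toNat).reverse)[j]'hj) := by
  have hd : ((lsdigits num.toNat).reverse)[j]'hj ∈ lsdigits num.toNat := by
    exact List.mem_reverse.mp (List.getElem_mem hj)
  rw [PySem.Str.pyGet?_natCast, PySem.Int.toList_toStr, pv_toChars_eq num hnum,
    ← List.map_reverse]
  rw [List.getElem?_map]
  rw [List.getElem?_eq_getElem hj]
  simp only [Option.map_some, Option.getD_some]
  rw [pv_ofChars_digitChar (pv_digit_lt hd)]
  rfl

-- A's descending loop fills the first k buffer slots with the mapped pieces
lemma pv_loopA (num : Int) (mapping : List Int) (hnum : 0 ≤ num) :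
    ∀ (k : Nat) (x0 : List String), k ≤ ((lsdigits num.toNat).reverse).length →
    x0.length = ((lsdigits num.toNat).reverse).length →
    (PySem.List.pyRange ((k : Int) - 1) (-1) (-1)).foldl
      (fun x i =>
        PySem.List.pySetD x i (PySem.Int.toStr (PySem.List.pyGetD mapping
          ((PySem.Int.ofChars? [(PySem.Str.pyGet? (PySem.Int.toStr num) i).getD ' ']).getD 0) 0)))
      x0
    = (((lsdigits num.toNat).reverse).take k).map (pvPiece mapping) ++ x0.drop k := by
  intro k
  induction k with
  | zero =>
    intro x0 _ _
    rw [show ((0 : Nat) : Int) - 1 = -1 by norm_num,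
      PySem.List.pyRange_neg_one_eq_nil (le_refl _)]
    simp
  | succ k ih =>
    intro x0 hk hx
    rw [show ((k + 1 : Nat) : Int) - 1 = (k : Int) by push_cast; ring,
      PySem.List.pyRange_neg_one_cons (by omega : (-1 : Int) < (k : Int)), List.foldl_cons]
    have hkl : k < ((lsdigits num.toNat).reverse).length := by omega
    have hset :
        (PySem.List.pySetD x0 (k : Int) (PySem.Int.toStr (PySem.List.pyGetD mapping
          ((PySem.Int.ofChars? [(PySem.Str.pyGet? (PySem.Int.toStr num) (k : Int)).getD ' ']).getD 0) 0)))
        = x0.set k (pvPiece mapping (((lsdigits num.toNat).reverse)[k]'hkl)) := by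
      rw [PySem.List.pySetD_natCast, pv_charPiece num mapping k hnum hkl]
    rw [hset, ih _ (by omega) (by rw [List.length_set]; exact hx)]
    rw [List.drop_set, if_neg (by omega : ¬ k < k), Nat.sub_self]
    rw [List.drop_eq_getElem_cons (show k < x0.length by omega), List.set_cons_zero]
    rw [List.take_add_one, List.getElem?_eq_getElem hkl]
    simp [List.append_assoc]

-- A computes int of the join of the mapped pieces, most significant digit first
lemma pv_A_eq (num : Int) (mapping : List Int) (hnum : 0 ≤ num) :
    mapp num mapping =
      (PySem.Int.ofStr? (PySem.Str.join ""
        (((lsdigits num.toNat).reverse).map (pvPiece mapping)))).getD 0 := by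
  unfold mapp
  have hlen : PySem.Str.len (PySem.Int.toStr num)
      = (((lsdigits num.toNat).reverse).length : Int) := by
    rw [PySem.Str.len_eq, PySem.Int.toList_toStr, pv_toChars_eq num hnum]
    simp
  simp only [hlen, Int.toNat_natCast]
  rw [pv_loopA num mapping hnum ((lsdigits num.toNat).reverse).length
      (List.replicate ((lsdigits num.toNat).reverse).length "0") (le_refl _) (by simp)]
  rw [List.take_length]
  simp

-- B's loop appends the mapped pieces, least significant digit first
lemma pv_B_go_aux (N : Nat) : ∀ (n : Int) (mapping : List Int) (acc : List String),
    0 ≤ n → n.toNat ≤ N →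
    mappGo mapping n acc = acc ++ (lsdigits n.toNat).map (pvPiece mapping) := by
  induction N with
  | zero =>
    intro n mapping acc h0 hN
    have hn : n = 0 := by omega
    subst hn
    rw [mappGo.eq_1]
    have h1 : PySem.Int.floordiv 0 10 = 0 := by decide
    have h2 : PySem.Int.mod 0 10 = 0 := by decide
    simp only [h1, h2, if_neg (by omega : ¬ (0:Int) < 0), lsdigits]
    simp [pvPiece]
  | succ N ih =>
    intro n mapping acc h0 hN
    rw [mappGo.eq_1]
    have hqd : PySem.Int.floordiv n 10 = n / 10 :=
      PySem.Int.floordiv_eq_ediv_of_pos (by norm_num)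
    have hmd : PySem.Int.mod n 10 = n % 10 :=
      PySem.Int.mod_eq_emod_of_pos (by norm_num)
    simp only [hqd, hmd]
    by_cases h : 0 < n / 10
    · rw [if_pos h, ih (n / 10) mapping _ (by omega) (by omega)]
      have hdig : lsdigits n.toNat = n.toNat % 10 :: lsdigits (n / 10).toNat := by
        unfold lsdigits
        rw [if_neg (by omega), if_neg (by omega),
          Nat.digits_def' (by norm_num : 1 < 10) (by omega),
          show (n / 10).toNat = n.toNat / 10 by omega]
      rw [hdig]
      have hcast : (n % 10 : Int) = ((n.toNat % 10 : Nat) : Int) := by omega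
      simp [pvPiece, hcast, List.append_assoc]
    · rw [if_neg h]
      have hdig : lsdigits n.toNat = [n.toNat] := by
        unfold lsdigits
        by_cases h0' : n.toNat = 0
        · rw [if_pos h0', h0']
        · rw [if_neg h0', Nat.digits_def' (by norm_num : 1 < 10) (by omega),
            show n.toNat / 10 = 0 by omega, Nat.digits_zero,
            Nat.mod_eq_of_lt (by omega)]
      rw [hdig]
      have hcast : (n % 10 : Int) = ((n.toNat : Nat) : Int) := by omega
      simp [pvPiece, hcast]

lemma pv_B_go (n : Int) (mapping : List Int) (acc : List String) (h : 0 ≤ n) :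
    mappGo mapping n acc = acc ++ (lsdigits n.toNat).map (pvPiece mapping) :=
  pv_B_go_aux n.toNat n mapping acc h (le_refl _)

-- ===== VERDICT (by name: the statement is the Claim_ definition above) =====
theorem mapp_spec : Claim_equal_mapp := by
  intro num mapping _ hpre
  unfold Spec_mapp
  rw [pv_A_eq num mapping hpre.1]
  unfold mapp_alt
  rw [pv_B_go num mapping [] hpre.1]
  simp only [List.nil_append, ← List.map_reverse]
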